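-- pv_equiv track=rewrite | github.com/s-koide-dc/Design2Code | src/utils/spec_auditor.py | _collect_downstream_by_input
-- ===== SOURCE A (Python) =====
-- from typing import Dict, Any, List, Set
--
-- def _collect_downstream_by_input(nodes: List[Dict[str, Any]]) -> Dict[str, List[str]]:
--     mapping: Dict[str, List[str]] = {}
--     for node in nodes:
--         node_id = node.get("id")
--         input_link = node.get("input_link")
--         if isinstance(node_id, str) and isinstance(input_link, str):
--             mapping.setdefault(input_link, []).append(node_id)
--     return mapping
-- ===== SOURCE B (Python) =====
-- from typing import Dict, Any, List
--
-- def _collect_downstream_by_input(nodes: List[Dict[str, Any]]) -> Dict[str, List[str]]: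
--     pairs = [(node.get("input_link"), node.get("id")) for node in nodes
--              if isinstance(node.get("id"), str) and isinstance(node.get("input_link"), str)]
--     keys = dict.fromkeys(link for link, _ in pairs)
--     return {k: [nid for link, nid in pairs if link == k] for k in keys}
-- ===== Notes on version B (the rewrite author's own statement) =====
-- stated objective: alternative
-- what changed: Replaced the single-pass dict accumulation with setdefault by a two-phase pipeline: first extract the filtered (input_link, id) pair list, then build the result as a comprehension over the first-occurrence-ordered distinct keys, gathering each group with a scan over the pairs.
import Mathlib
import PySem

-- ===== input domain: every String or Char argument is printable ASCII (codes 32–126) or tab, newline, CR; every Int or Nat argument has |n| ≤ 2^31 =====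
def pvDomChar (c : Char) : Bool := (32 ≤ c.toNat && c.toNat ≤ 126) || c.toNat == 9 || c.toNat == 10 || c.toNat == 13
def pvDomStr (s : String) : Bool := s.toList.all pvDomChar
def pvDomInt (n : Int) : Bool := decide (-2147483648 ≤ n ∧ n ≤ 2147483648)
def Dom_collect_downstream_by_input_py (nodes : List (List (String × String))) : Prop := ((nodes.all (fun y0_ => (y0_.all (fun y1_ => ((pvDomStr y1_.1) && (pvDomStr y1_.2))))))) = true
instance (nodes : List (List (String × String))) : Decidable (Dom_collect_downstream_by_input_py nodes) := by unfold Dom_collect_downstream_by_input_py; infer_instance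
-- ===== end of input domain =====

-- B replaces A's one-pass setdefault accumulation by a filtered pair list + group-per-distinct-key scans (alternative decomposition, same results).

-- ===== PORT A =====
-- mapping.setdefault(input_link, []).append(node_id)  ==  mapping[k] = mapping.get(k, []) + [node_id]; ported as Dict.modify
def collect_downstream_by_input_py (nodes : List (List (String × String))) : List (String × List String) :=
  (nodes.foldl (fun (mapping : PySem.Dict String (List String)) node =>
      match (PySem.Dict.mk node).get? "id", (PySem.Dict.mk node).get? "input_link" with
      | some nid, some il => mapping.modify il [] (fun l => l ++ [nid])
      | _, _ => mapping) PySem.Dict.empty).items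

-- ===== PORT B =====
def pvPairOf (node : List (String × String)) : Option (String × String) := do
  let nid ← (PySem.Dict.mk node).get? "id"
  let il ← (PySem.Dict.mk node).get? "input_link"
  pure (il, nid)

def collect_downstream_by_input_py_alt (nodes : List (List (String × String))) : List (String × List String) :=
  let pairs := nodes.filterMap pvPairOf
  let keys := PySem.List.dedup (pairs.map (fun p => p.1))
  keys.map (fun k => (k, (pairs.filter (fun p => p.1 == k)).map (fun p => p.2)))

-- ===== PRECONDITION & SPEC =====
def Spec_collect_downstream_by_input_py (nodes : List (List (String × String))) (out : List (String × List String)) : Prop := out = collect_downstream_by_input_py_alt nodes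
instance (nodes : List (List (String × String))) (out : List (String × List String)) : Decidable (Spec_collect_downstream_by_input_py nodes out) := by unfold Spec_collect_downstream_by_input_py; infer_instance

-- ===== CLAIM (what is proved, stated in full; the proofs are below) =====
def Claim_equal_collect_downstream_by_input_py : Prop := ∀ (nodes : List (List (String × String))), Dom_collect_downstream_by_input_py nodes → Spec_collect_downstream_by_input_py nodes (collect_downstream_by_input_py nodes)

-- ===== LEMMAS AND PROOFS =====

-- A's loop over nodes equals the modify-loop over the filtered pair list.
theorem foldA_eq_foldPairs (nodes : List (List (String × String))) (d : PySem.Dict String (List String)) :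
    nodes.foldl (fun (mapping : PySem.Dict String (List String)) node =>
      match (PySem.Dict.mk node).get? "id", (PySem.Dict.mk node).get? "input_link" with
      | some nid, some il => mapping.modify il [] (fun l => l ++ [nid])
      | _, _ => mapping) d
    = (nodes.filterMap pvPairOf).foldl (fun (mapping : PySem.Dict String (List String)) p =>
          mapping.modify p.1 [] (fun l => l ++ [p.2])) d := by
  induction nodes generalizing d with
  | nil => rfl
  | cons n ns ih =>
    simp only [List.foldl_cons, List.filterMap_cons]
    cases h1 : (PySem.Dict.mk n).get? "id" <;> cases h2 : (PySem.Dict.mk n).get? "input_link" <;>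
      simp [pvPairOf, h1, h2, ih]

-- ===== VERDICT (by name: the statement is the Claim_ definition above) =====
theorem collect_downstream_by_input_py_spec : Claim_equal_collect_downstream_by_input_py := by
  intro nodes _
  show _ = _
  unfold collect_downstream_by_input_py collect_downstream_by_input_py_alt
  rw [foldA_eq_foldPairs]
  set ps := nodes.filterMap pvPairOf with hps
  have hnd : (ps.foldl (fun (mapping : PySem.Dict String (List String)) p =>
      mapping.modify p.1 [] (fun l => l ++ [p.2])) PySem.Dict.empty).keys.Nodup := by
    exact PySem.Dict.nodup_keys_foldl_modify_key ps (fun p => p.1) [] (fun d p l => l ++ [p.2])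
      PySem.Dict.empty (by simp [PySem.Dict.keys_empty])
  rw [PySem.Dict.items_eq_map_keys _ hnd []]
  have hkeys : (ps.foldl (fun (mapping : PySem.Dict String (List String)) p =>
      mapping.modify p.1 [] (fun l => l ++ [p.2])) PySem.Dict.empty).keys
      = PySem.List.dedup (ps.map (fun p => p.1)) := by
    rw [PySem.Dict.keys_foldl_modify_key]
    simp [PySem.Dict.keys_empty, PySem.List.dedup_eq_ofList, PySem.Set.update, PySem.Set.ofList]
  rw [hkeys]
  apply List.map_congr_left
  intro k _
  congr 1
  rw [PySem.Dict.getD_foldl_modify_append]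
  simp [PySem.Dict.getD_empty]
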